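-- pv_equiv track=rewrite | github.com/Abduvaliyevakumushxon/list_search | find06_max_odd.py | find_max_odd
-- ===== SOURCE A (Python) =====
-- def find_max_odd(data):
--     """
--     Given the list of numbers, Find the maximum odd number in the list
--     args:
--         data: list of numbers
--     returns: maximum odd number in the list
--     """
--     a=[]
--     for i in data:
--         if i%2==1:
--             a.append(i)
--     if len(a)==0:
--         return -1
--     mx=a[0]
--     for d in a:
--         if mx<d:
--             mx=d
--
--     return mx
-- ===== SOURCE B (Python) =====
-- def find_max_odd(data):
--     for x in sorted(data, reverse=True):
--         if x % 2 == 1: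
--             return x
--     return -1
-- ===== Notes on version B (the rewrite author's own statement) =====
-- stated objective: alternative
-- what changed: B sorts the list in descending order and returns the first element with x%2==1 (else -1), replacing A's two-pass filter-then-scan-for-max with a sort-then-first-match traversal.
import Mathlib
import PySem

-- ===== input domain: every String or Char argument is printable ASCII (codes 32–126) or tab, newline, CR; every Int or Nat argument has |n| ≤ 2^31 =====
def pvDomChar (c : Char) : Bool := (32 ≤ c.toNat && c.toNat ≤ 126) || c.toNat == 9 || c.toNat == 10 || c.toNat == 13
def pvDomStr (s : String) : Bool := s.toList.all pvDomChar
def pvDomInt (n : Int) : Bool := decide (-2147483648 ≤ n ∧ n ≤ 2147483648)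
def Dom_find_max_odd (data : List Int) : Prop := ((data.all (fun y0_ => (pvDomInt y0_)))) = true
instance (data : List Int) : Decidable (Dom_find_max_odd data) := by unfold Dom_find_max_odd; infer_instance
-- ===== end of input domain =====

-- B replaces A's filter-odds-then-scan-for-max with sort-descending-then-first-odd; objective: alternative algorithm.

-- ===== PORT A =====
def find_max_odd (data : List Int) : Int :=
  let a := data.foldl (fun acc i => if PySem.Int.mod i 2 == 1 then acc ++ [i] else acc) []
  match a with
  | [] => -1
  | m :: _ => a.foldl (fun mx d => if mx < d then d else mx) m

-- ===== PORT B =====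
def pvFirstOdd : List Int → Int
  | [] => -1
  | x :: t => if PySem.Int.mod x 2 == 1 then x else pvFirstOdd t

def find_max_odd_alt (data : List Int) : Int :=
  pvFirstOdd (PySem.List.sorted data (fun x => x) true)

-- ===== PRECONDITION & SPEC =====
def Spec_find_max_odd (data : List Int) (out : Int) : Prop := out = find_max_odd_alt data
instance (data : List Int) (out : Int) : Decidable (Spec_find_max_odd data out) := by unfold Spec_find_max_odd; infer_instance

-- ===== CLAIM (what is proved, stated in full; the proofs are below) =====
def Claim_equal_find_max_odd : Prop := ∀ (data : List Int), Dom_find_max_odd data → Spec_find_max_odd data (find_max_odd data)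

-- ===== LEMMAS AND PROOFS =====

-- A's max scan: step function is max
theorem pv_step_eq_max (mx d : Int) : (if mx < d then d else mx) = max mx d := by
  rcases lt_or_ge mx d with h | h
  · simp [h, max_eq_right h.le]
  · simp [not_lt_of_ge h, max_eq_left h]

theorem pv_foldl_step_eq_foldl_max (t : List Int) (m : Int) :
    t.foldl (fun mx d => if mx < d then d else mx) m = t.foldl max m := by
  induction t generalizing m with
  | nil => rfl
  | cons x t ih => simp only [List.foldl, pv_step_eq_max]

-- A's result on a nonempty odds list m :: t: it is in the list and an upper bound
theorem pv_A_mem (m : Int) (t : List Int) :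
    (m :: t).foldl (fun mx d => if mx < d then d else mx) m ∈ m :: t := by
  rw [pv_foldl_step_eq_foldl_max]
  rcases PySem.List.foldl_max_mem (m :: t) m with h | h
  · rw [h]; exact List.mem_cons_self
  · exact h

theorem pv_A_ub (m : Int) (t : List Int) :
    ∀ y ∈ m :: t, y ≤ (m :: t).foldl (fun mx d => if mx < d then d else mx) m := by
  rw [pv_foldl_step_eq_foldl_max]
  exact (PySem.List.le_foldl_max (m :: t) m).2

-- B's first-odd in a descending list: facts by induction
theorem pv_firstOdd_cases (xs : List Int) :
    (∀ y ∈ xs, ¬ (PySem.Int.mod y 2 == 1)) ∨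
    (pvFirstOdd xs ∈ xs ∧ (PySem.Int.mod (pvFirstOdd xs) 2 == 1) = true) := by
  induction xs with
  | nil => left; intro y hy; cases hy
  | cons x t ih =>
    by_cases h : (PySem.Int.mod x 2 == 1) = true
    · right
      rw [show pvFirstOdd (x :: t) = x from by simp only [pvFirstOdd, if_pos h]]
      exact ⟨List.mem_cons_self, h⟩
    · have hrw : pvFirstOdd (x :: t) = pvFirstOdd t := by simp only [pvFirstOdd, if_neg h]
      rcases ih with h1 | ⟨h1, h2⟩
      · left; intro y hy
        rcases List.mem_cons.mp hy with rfl | hyt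
        · exact h
        · exact h1 y hyt
      · right
        rw [hrw]
        exact ⟨List.mem_cons_of_mem _ h1, h2⟩

theorem pv_firstOdd_none (xs : List Int)
    (h : ∀ y ∈ xs, ¬ (PySem.Int.mod y 2 == 1)) : pvFirstOdd xs = -1 := by
  induction xs with
  | nil => rfl
  | cons x t ih =>
    have hx : ¬ (PySem.Int.mod x 2 == 1) = true := h x List.mem_cons_self
    rw [show pvFirstOdd (x :: t) = pvFirstOdd t from by simp only [pvFirstOdd, if_neg hx]]
    exact ih (fun y hy => h y (List.mem_cons_of_mem _ hy))

-- in a pairwise-descending list, the first odd bounds every odd element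
theorem pv_firstOdd_ub (xs : List Int)
    (hp : xs.Pairwise (fun a b => b ≤ a)) :
    ∀ y ∈ xs, (PySem.Int.mod y 2 == 1) → y ≤ pvFirstOdd xs := by
  induction xs with
  | nil => intro y hy; cases hy
  | cons x t ih =>
    intro y hy hyodd
    by_cases h : (PySem.Int.mod x 2 == 1) = true
    · rw [show pvFirstOdd (x :: t) = x from by simp only [pvFirstOdd, if_pos h]]
      rcases List.mem_cons.mp hy with rfl | hyt
      · exact le_refl y
      · exact (List.pairwise_cons.mp hp).1 y hyt
    · rw [show pvFirstOdd (x :: t) = pvFirstOdd t from by simp only [pvFirstOdd, if_neg h]]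
      rcases List.mem_cons.mp hy with rfl | hyt
      · exact absurd hyodd h
      · exact ih (List.pairwise_cons.mp hp).2 y hyt hyodd

-- ===== VERDICT (by name: the statement is the Claim_ definition above) =====
theorem find_max_odd_spec : Claim_equal_find_max_odd := by
  intro data _
  unfold Spec_find_max_odd find_max_odd find_max_odd_alt
  simp only [PySem.List.foldl_append_if_eq_filter, List.nil_append]
  set odd : Int → Bool := fun i => PySem.Int.mod i 2 == 1 with hodd
  set s := PySem.List.sorted data (fun x => x) true with hs
  have hperm : s.Perm data := PySem.List.sorted_perm data (fun x => x) true
  have hpair : s.Pairwise (fun a b => b ≤ a) := by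
    simpa using PySem.List.sorted_pairwise_rev data (fun x => x)
  cases hfo : data.filter odd with
  | nil =>
    have hnone : ∀ y ∈ s, ¬ (odd y = true) := by
      intro y hy hody
      have : y ∈ data.filter odd :=
        List.mem_filter.mpr ⟨hperm.mem_iff.mp hy, hody⟩
      simp [hfo] at this
    simpa using (pv_firstOdd_none s hnone).symm
  | cons m t =>
    -- B's result is an odd member of data
    rcases pv_firstOdd_cases s with hB1 | ⟨hBmem, hBodd⟩
    · -- impossible: m is odd and in s
      exfalso
      have hm : m ∈ data.filter odd := by simp [hfo]
      have hmm : m ∈ s := hperm.mem_iff.mpr (List.mem_filter.mp hm).1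
      exact hB1 m hmm (List.mem_filter.mp hm).2
    · -- B's value is in odds list, and bounds all odds; A's value likewise; antisymm
      have hBm : pvFirstOdd s ∈ data.filter odd :=
        List.mem_filter.mpr ⟨hperm.mem_iff.mp hBmem, hBodd⟩
      rw [hfo] at hBm
      have hAmem := pv_A_mem m t
      have hAub := pv_A_ub m t
      have hAodds : (m :: t).foldl (fun mx d => if mx < d then d else mx) m ∈ data.filter odd := by
        rw [hfo]; exact hAmem
      have hAin : (m :: t).foldl (fun mx d => if mx < d then d else mx) m ∈ s :=
        hperm.mem_iff.mpr (List.mem_filter.mp hAodds).1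
      have hAodd : odd ((m :: t).foldl (fun mx d => if mx < d then d else mx) m) = true :=
        (List.mem_filter.mp hAodds).2
      have h1 : (m :: t).foldl (fun mx d => if mx < d then d else mx) m ≤ pvFirstOdd s :=
        pv_firstOdd_ub s hpair _ hAin hAodd
      have h2 : pvFirstOdd s ≤ (m :: t).foldl (fun mx d => if mx < d then d else mx) m :=
        hAub _ hBm
      exact le_antisymm h1 h2
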